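-- pv_equiv track=rewrite | github.com/DevilDeath07/Leet_code_solution | daily_solution/Medium/2411. Smallest Subarrays With Maximum Bitwise OR.py | smallestSubarrays
-- ===== SOURCE A (Python) =====
-- from typing import List
--
-- def smallestSubarrays(nums: List[int]) -> List[int]:
--     n = len(nums)
--     max_or = 0
--     for num in nums:
--         max_or |= num
--
--     result = [1] * n
--     last_occurrence = [-1] * 32  # Track latest index of each bit
--
--     for i in range(n - 1, -1, -1):
--         num = nums[i]
--         for b in range(32):
--             if num & (1 << b):
--                 last_occurrence[b] = i
--
--         farthest = i
--         for b in range(32):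
--             if max_or & (1 << b):
--                 if last_occurrence[b] != -1:
--                     farthest = max(farthest, last_occurrence[b])
--
--         result[i] = farthest - i + 1
--     return result
-- ===== SOURCE B (Python) =====
-- from typing import List
--
-- def smallestSubarrays(nums: List[int]) -> List[int]:
--     # For each start index, scan forward until the running 32-bit OR reaches the
--     # suffix's full 32-bit OR; no per-bit last-occurrence bookkeeping.
--     MASK = 0xFFFFFFFF
--     res = []
--     for i in range(len(nums)):
--         suffix = nums[i:]
--         target = 0
--         for v in suffix:
--             target |= v & MASK
--         cur = 0
--         k = 0
--         for v in suffix: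
--             cur |= v & MASK
--             k += 1
--             if cur == target:
--                 break
--         res.append(k)
--     return res
-- ===== Notes on version B (the rewrite author's own statement) =====
-- stated objective: simpler
-- what changed: Replaces the global max-OR plus per-bit last-occurrence bookkeeping with a direct forward scan per start index: the answer at i is the shortest prefix of nums[i:] whose running 32-bit OR equals the suffix's full 32-bit OR.
import Mathlib
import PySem

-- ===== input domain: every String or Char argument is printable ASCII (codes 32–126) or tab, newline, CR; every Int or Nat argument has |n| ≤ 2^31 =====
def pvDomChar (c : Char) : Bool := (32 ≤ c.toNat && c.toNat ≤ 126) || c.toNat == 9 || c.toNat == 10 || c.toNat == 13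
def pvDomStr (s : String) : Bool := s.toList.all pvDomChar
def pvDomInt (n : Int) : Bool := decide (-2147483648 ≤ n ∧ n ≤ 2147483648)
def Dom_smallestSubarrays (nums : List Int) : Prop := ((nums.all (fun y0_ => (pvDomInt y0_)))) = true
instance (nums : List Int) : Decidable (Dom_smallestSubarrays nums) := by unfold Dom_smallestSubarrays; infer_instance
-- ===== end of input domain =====

-- B replaces A's global max-OR plus per-bit last-occurrence bookkeeping by a direct
-- forward scan per start index (simpler, not faster): answer at i = length of the
-- shortest prefix of nums[i:] whose running 32-bit OR equals the suffix's full 32-bit OR.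

-- ===== PORT A =====
-- A-side helper: the body of A's main loop (verbatim; `1 << b` is ported as `1 <<< b.toNat`,
-- exact since b runs over range(32)).
def pvStepA (nums : List Int) (maxOr : Int) (st : List Int × List Int) (i : Int) :
    List Int × List Int :=
  let num := PySem.List.pyGetD nums i 0
  let lo := (PySem.List.pyRange 0 32 1).foldl
    (fun lo b =>
      if PySem.Int.band num ((1 : Int) <<< b.toNat) ≠ 0 then PySem.List.pySetD lo b i else lo)
    st.1
  let farthest := (PySem.List.pyRange 0 32 1).foldl
    (fun f b =>
      if PySem.Int.band maxOr ((1 : Int) <<< b.toNat) ≠ 0 then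
        (if PySem.List.pyGetD lo b 0 ≠ -1 then max f (PySem.List.pyGetD lo b 0) else f)
      else f)
    i
  (lo, PySem.List.pySetD st.2 i (farthest - i + 1))

def smallestSubarrays (nums : List Int) : List Int :=
  let n : Int := PySem.List.len nums
  let maxOr : Int := nums.foldl (fun a num => PySem.Int.bor a num) 0
  ((PySem.List.pyRange (n - 1) (-1) (-1)).foldl (pvStepA nums maxOr)
    (List.replicate 32 (-1), List.replicate n.toNat 1)).2

-- ===== PORT B =====
-- B-side helper: the inner `for v in suffix: cur |= v & MASK; k += 1; if cur == target: break` loop.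
def bScan : List Int → Int → Int → Int → Int
  | [], _cur, _target, k => k
  | v :: r, cur, target, k =>
    let cur' := PySem.Int.bor cur (PySem.Int.band v 4294967295)
    let k' := k + 1
    if cur' = target then k' else bScan r cur' target k'

def smallestSubarrays_alt (nums : List Int) : List Int :=
  (PySem.List.pyRange 0 (PySem.List.len nums) 1).foldl
    (fun res i =>
      let suffix := PySem.List.slice nums (some i) none
      let target := suffix.foldl (fun a v => PySem.Int.bor a (PySem.Int.band v 4294967295)) 0
      res ++ [bScan suffix 0 target 0])
    []

-- ===== PRECONDITION & SPEC =====
def Spec_smallestSubarrays (nums : List Int) (out : List Int) : Prop := out = smallestSubarrays_alt nums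
instance (nums : List Int) (out : List Int) : Decidable (Spec_smallestSubarrays nums out) := by unfold Spec_smallestSubarrays; infer_instance

-- ===== CLAIM (what is proved, stated in full; the proofs are below) =====
def Claim_equal_smallestSubarrays : Prop := ∀ (nums : List Int), Dom_smallestSubarrays nums → Spec_smallestSubarrays nums (smallestSubarrays nums)

-- ===== LEMMAS AND PROOFS =====

/- Proof-side model: everything is reduced to the list of 32-bit masked values. -/
def pvMask (v : Int) : Nat := (PySem.Int.band v 4294967295).toNat
def pvMs (nums : List Int) : List Nat := nums.map pvMask
def pvOr (l : List Nat) : Nat := l.foldl (· ||| ·) 0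
def pvScan : List Nat → Nat → Nat → Nat → Nat
  | [], _, _, k => k
  | x :: r, cur, target, k => if cur ||| x = target then k + 1 else pvScan r (cur ||| x) target (k + 1)
def pvAns (l : List Int) : Int := ((pvScan (pvMs l) 0 (pvOr (pvMs l)) 0 : Nat) : Int)
def pvRes (nums : List Int) (t : Nat) : List Int :=
  (List.range nums.length).map (fun j => if t ≤ j then pvAns (nums.drop j) else 1)
def pvOcc (l : List Nat) (b : Nat) : Option Nat := l.findIdx? (fun x => x.testBit b)
def pvEnc : Option Nat → Int
  | some j => (j : Int)
  | none => -1
def pvFMax (g : Nat → Option Nat) (L : List Nat) (a : Nat) : Nat :=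
  L.foldl (fun f b => match g b with | some j => max f j | none => f) a
def pvFar (l : List Nat) : Nat := pvFMax (pvOcc l) (List.range 32) 0

/- ---- bitwise foundation ---- -/

theorem pv_and_add_ldiff (m : Nat) : ∀ x : Nat, (m &&& x) + m.ldiff x = m := by
  induction m using Nat.binaryRec' with
  | zero => intro x; simp [Nat.ldiff, Nat.bitwise_zero_left]
  | bit b n hn ih =>
    intro x
    rw [← Nat.bit_bodd_div2 x, Nat.land_bit, Nat.ldiff_bit]
    have h := ih x.div2
    generalize hA : n &&& x.div2 = c at h ⊢
    generalize hB : n.ldiff x.div2 = d at h ⊢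
    cases b <;> cases hx : x.bodd <;> simp [Nat.bit_val] <;> omega

theorem pv_sub_and (m x : Nat) : m - (m &&& x) = m.ldiff x := by
  have h := pv_and_add_ldiff m x
  generalize hA : m &&& x = c at h ⊢
  generalize hB : m.ldiff x = d at h ⊢
  omega

theorem pv_band_eq_land (a b : Int) : PySem.Int.band a b = Int.land a b := by
  cases a with
  | ofNat m =>
    cases b with
    | ofNat n =>
      rw [PySem.Int.band, if_pos (show (0:Int) ≤ Int.ofNat m from Int.natCast_nonneg m),
        if_pos (show (0:Int) ≤ Int.ofNat n from Int.natCast_nonneg n)]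
      rfl
    | negSucc n =>
      rw [PySem.Int.band, if_pos (show (0:Int) ≤ Int.ofNat m from Int.natCast_nonneg m),
        if_neg (show ¬ (0:Int) ≤ Int.negSucc n from not_le.mpr (Int.negSucc_lt_zero n)),
        show (Int.ofNat m).toNat = m from rfl,
        show (-Int.negSucc n - 1).toNat = n from by rw [Int.negSucc_eq]; omega,
        pv_sub_and]
      rfl
  | negSucc m =>
    cases b with
    | ofNat n =>
      rw [PySem.Int.band, if_neg (show ¬ (0:Int) ≤ Int.negSucc m from not_le.mpr (Int.negSucc_lt_zero m)),
        if_pos (show (0:Int) ≤ Int.ofNat n from Int.natCast_nonneg n),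
        show (Int.ofNat n).toNat = n from rfl,
        show (-Int.negSucc m - 1).toNat = m from by rw [Int.negSucc_eq]; omega,
        pv_sub_and]
      rfl
    | negSucc n =>
      rw [PySem.Int.band, if_neg (show ¬ (0:Int) ≤ Int.negSucc m from not_le.mpr (Int.negSucc_lt_zero m)),
        if_neg (show ¬ (0:Int) ≤ Int.negSucc n from not_le.mpr (Int.negSucc_lt_zero n)),
        show (-Int.negSucc m - 1).toNat = m from by rw [Int.negSucc_eq]; omega,
        show (-Int.negSucc n - 1).toNat = n from by rw [Int.negSucc_eq]; omega,
        show Int.land (Int.negSucc m) (Int.negSucc n) = Int.negSucc (m ||| n) from rfl,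
        Int.negSucc_eq]
      ring

theorem pv_bor_eq_lor (a b : Int) : PySem.Int.bor a b = Int.lor a b := by
  cases a with
  | ofNat m =>
    cases b with
    | ofNat n =>
      rw [PySem.Int.bor, if_pos (show (0:Int) ≤ Int.ofNat m from Int.natCast_nonneg m),
        if_pos (show (0:Int) ≤ Int.ofNat n from Int.natCast_nonneg n)]
      rfl
    | negSucc n =>
      rw [PySem.Int.bor, if_pos (show (0:Int) ≤ Int.ofNat m from Int.natCast_nonneg m),
        if_neg (show ¬ (0:Int) ≤ Int.negSucc n from not_le.mpr (Int.negSucc_lt_zero n)),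
        show (Int.ofNat m).toNat = m from rfl,
        show (-Int.negSucc n - 1).toNat = n from by rw [Int.negSucc_eq]; omega,
        pv_sub_and,
        show Int.lor (Int.ofNat m) (Int.negSucc n) = Int.negSucc (Nat.ldiff n m) from rfl,
        Int.negSucc_eq]
      ring
  | negSucc m =>
    cases b with
    | ofNat n =>
      rw [PySem.Int.bor, if_neg (show ¬ (0:Int) ≤ Int.negSucc m from not_le.mpr (Int.negSucc_lt_zero m)),
        if_pos (show (0:Int) ≤ Int.ofNat n from Int.natCast_nonneg n),
        show (Int.ofNat n).toNat = n from rfl,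
        show (-Int.negSucc m - 1).toNat = m from by rw [Int.negSucc_eq]; omega,
        pv_sub_and,
        show Int.lor (Int.negSucc m) (Int.ofNat n) = Int.negSucc (Nat.ldiff m n) from rfl,
        Int.negSucc_eq]
      ring
    | negSucc n =>
      rw [PySem.Int.bor, if_neg (show ¬ (0:Int) ≤ Int.negSucc m from not_le.mpr (Int.negSucc_lt_zero m)),
        if_neg (show ¬ (0:Int) ≤ Int.negSucc n from not_le.mpr (Int.negSucc_lt_zero n)),
        show (-Int.negSucc m - 1).toNat = m from by rw [Int.negSucc_eq]; omega,
        show (-Int.negSucc n - 1).toNat = n from by rw [Int.negSucc_eq]; omega,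
        show Int.lor (Int.negSucc m) (Int.negSucc n) = Int.negSucc (m &&& n) from rfl,
        Int.negSucc_eq]
      ring


theorem pv_testBit_ofNat (m b : Nat) : Int.testBit (Int.ofNat m) b = m.testBit b := rfl
theorem pv_testBit_negSucc (m b : Nat) : Int.testBit (Int.negSucc m) b = !(m.testBit b) := rfl

theorem pv_band_pow_ne (v : Int) (b : Nat) :
    (PySem.Int.band v ((1 : Int) <<< (b : Int)) ≠ 0) ↔ Int.testBit v b = true := by
  rw [Int.one_shiftLeft, pv_band_eq_land]
  cases v with
  | ofNat m =>
    rw [show Int.land (Int.ofNat m) ((2 ^ b : Nat) : Int) = ((m &&& 2 ^ b : Nat) : Int) from rfl,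
      pv_testBit_ofNat, Nat.and_two_pow]
    cases h : m.testBit b <;> simp [h]
  | negSucc m =>
    rw [show Int.land (Int.negSucc m) ((2 ^ b : Nat) : Int) = ((Nat.ldiff (2 ^ b) m : Nat) : Int) from rfl,
      pv_testBit_negSucc]
    constructor
    · intro h
      by_contra hbb
      have hb : m.testBit b = true := by simpa using hbb
      apply h
      norm_cast
      apply Nat.zero_of_testBit_eq_false
      intro i
      rw [Nat.testBit_ldiff, Nat.testBit_two_pow]
      by_cases hib : b = i
      · subst hib; simp [hb]
      · simp [hib]
    · intro h hz
      have h' : m.testBit b = false := by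
        cases hm : m.testBit b
        · rfl
        · rw [hm] at h; simp at h
      have hbit : (Nat.ldiff (2 ^ b) m).testBit b = true := by
        rw [Nat.testBit_ldiff, Nat.testBit_two_pow, h']
        simp
      have hz' : Nat.ldiff (2 ^ b) m = 0 := by exact_mod_cast hz
      rw [hz'] at hbit
      simp at hbit

theorem pv_band_mask_nonneg (v : Int) : 0 ≤ PySem.Int.band v 4294967295 := by
  rw [PySem.Int.band_comm]
  exact PySem.Int.band_nonneg_of_nonneg_left v (by norm_num)

theorem pv_band_mask_eq (v : Int) : PySem.Int.band v 4294967295 = ((pvMask v : Nat) : Int) := by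
  rw [pvMask, Int.toNat_of_nonneg (pv_band_mask_nonneg v)]

theorem pv_testBit_toNat (w : Int) (h : 0 ≤ w) (b : Nat) : (w.toNat).testBit b = Int.testBit w b := by
  cases w with
  | ofNat m => rfl
  | negSucc m => exact absurd h (by exact of_decide_eq_false rfl)

theorem pv_mask_numeral : (4294967295 : Int) = ((2 ^ 32 - 1 : Nat) : Int) := by norm_num

theorem pv_testBit_mask (v : Int) (b : Nat) :
    (pvMask v).testBit b = (Int.testBit v b && decide (b < 32)) := by
  rw [pvMask, pv_testBit_toNat _ (pv_band_mask_nonneg v), pv_mask_numeral, pv_band_eq_land,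
    Int.testBit_land,
    show Int.testBit (((2 ^ 32 - 1 : Nat)) : Int) b = Nat.testBit (2 ^ 32 - 1) b from rfl,
    Nat.testBit_two_pow_sub_one]

theorem pv_mask_lt (v : Int) : pvMask v < 2 ^ 32 := by
  have h : pvMask v ≤ 2 ^ 32 - 1 := by
    rw [pvMask, pv_mask_numeral, pv_band_eq_land]
    cases v with
    | ofNat m =>
      rw [show Int.land (Int.ofNat m) (((2 ^ 32 - 1 : Nat)) : Int) = ((m &&& (2 ^ 32 - 1) : Nat) : Int) from rfl]
      simp only [Int.toNat_natCast]
      exact Nat.and_le_right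
    | negSucc m =>
      rw [show Int.land (Int.negSucc m) (((2 ^ 32 - 1 : Nat)) : Int) = ((Nat.ldiff (2 ^ 32 - 1) m : Nat) : Int) from rfl]
      simp only [Int.toNat_natCast]
      have h2 := pv_and_add_ldiff (2 ^ 32 - 1) m
      generalize hA : (2 ^ 32 - 1) &&& m = c at h2
      generalize hB : Nat.ldiff (2 ^ 32 - 1) m = d at h2 ⊢
      omega
  generalize hC : pvMask v = c at h ⊢
  omega

/- ---- OR folds ---- -/

theorem pv_testBit_foldl_or (b : Nat) :
    ∀ (l : List Nat) (a : Nat),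
      ((l.foldl (· ||| ·) a).testBit b) = (a.testBit b || l.any (fun x => x.testBit b)) := by
  intro l
  induction l with
  | nil => intro a; simp
  | cons x r ih =>
    intro a
    simp [List.foldl_cons, ih, Nat.testBit_lor, Bool.or_assoc]

theorem pv_testBit_pvOr (l : List Nat) (b : Nat) :
    (pvOr l).testBit b = l.any (fun x => x.testBit b) := by
  simp [pvOr, pv_testBit_foldl_or]

theorem pv_or_cons (x : Nat) (l : List Nat) : pvOr (x :: l) = x ||| pvOr l := by
  apply Nat.eq_of_testBit_eq
  intro i
  simp [pv_testBit_pvOr, Nat.testBit_lor, Bool.or_assoc]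

theorem pv_testBit_foldl_bor (b : Nat) :
    ∀ (l : List Int) (a : Int),
      Int.testBit (l.foldl (fun x v => PySem.Int.bor x v) a) b =
        (Int.testBit a b || l.any (fun v => Int.testBit v b)) := by
  intro l
  induction l with
  | nil => intro a; simp
  | cons x r ih =>
    intro a
    rw [List.foldl_cons, ih, pv_bor_eq_lor, Int.testBit_lor]
    simp [Bool.or_assoc]

theorem pv_testBit_maxOr (nums : List Int) (b : Nat) (hb : b < 32) :
    Int.testBit (nums.foldl (fun a num => PySem.Int.bor a num) 0) b =
      (pvOr (pvMs nums)).testBit b := by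
  rw [pv_testBit_foldl_bor, pv_testBit_pvOr]
  have h0 : Int.testBit (0 : Int) b = false := by
    rw [show Int.testBit (0 : Int) b = Nat.testBit 0 b from rfl, Nat.zero_testBit]
  rw [h0]
  simp only [Bool.false_or, pvMs, List.any_map, Function.comp_def]
  congr 1
  funext v
  rw [pv_testBit_mask]
  simp [hb]

/- ---- findIdx? facts ---- -/

theorem pv_occ_cons (x : Nat) (l : List Nat) (b : Nat) :
    pvOcc (x :: l) b = if x.testBit b then some 0 else (pvOcc l b).map (· + 1) := by
  simp [pvOcc, List.findIdx?_cons]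

theorem pv_occ_lt (l : List Nat) (b j : Nat) (h : pvOcc l b = some j) : j < l.length :=
  (List.findIdx?_eq_some_iff_findIdx_eq.mp h).1

theorem pv_occ_testBit (l : List Nat) (b j : Nat) (h : pvOcc l b = some j) :
    ∃ x ∈ l, x.testBit b = true := by
  by_contra hn
  push_neg at hn
  have hnone : pvOcc l b = none := by
    apply List.findIdx?_eq_none_iff.mpr
    intro x hx
    have := hn x hx
    simpa using this
  rw [hnone] at h
  cases h

theorem pv_occ_isSome_of_mem (l : List Nat) (b : Nat) (x : Nat) (hx : x ∈ l)
    (hb : x.testBit b = true) : (pvOcc l b).isSome = true := by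
  cases hocc : pvOcc l b with
  | some j => rfl
  | none =>
    have := List.findIdx?_eq_none_iff.mp hocc x hx
    rw [hb] at this
    cases this

theorem pv_any_take (p : Nat → Bool) :
    ∀ (l : List Nat) (m : Nat),
      ((l.take m).any p = true) ↔ ∃ j, l.findIdx? p = some j ∧ j < m := by
  intro l
  induction l with
  | nil => intro m; simp
  | cons x r ih =>
    intro m
    cases m with
    | zero => simp
    | succ m' =>
      rw [List.take_succ_cons, List.findIdx?_cons]
      by_cases hx : p x
      · simp [hx]
      · have hx' : p x = false := by simpa using hx
        rw [hx']
        simp only [Bool.false_eq_true, if_false, List.any_cons, hx', Bool.false_or]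
        constructor
        · intro h
          obtain ⟨j', hj', hlt⟩ := (ih m').mp h
          exact ⟨j' + 1, by rw [hj']; rfl, by omega⟩
        · rintro ⟨j, hj, hlt⟩
          rw [Option.map_eq_some_iff] at hj
          obtain ⟨j', hj', rfl⟩ := hj
          exact (ih m').mpr ⟨j', hj', by omega⟩

/- ---- fold-max characterisation ---- -/

theorem pv_fmax_cons (g : Nat → Option Nat) (c : Nat) (r : List Nat) (a : Nat) :
    pvFMax g (c :: r) a = pvFMax g r (match g c with | some j => max a j | none => a) := rfl

theorem pv_fmax_ge (g : Nat → Option Nat) :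
    ∀ (L : List Nat) (a : Nat), a ≤ pvFMax g L a := by
  intro L
  induction L with
  | nil => intro a; simp [pvFMax]
  | cons c r ih =>
    intro a
    rw [pvFMax, List.foldl_cons]
    cases hg : g c with
    | none => simpa [hg] using ih a
    | some j =>
      simp only [hg]
      exact le_trans (le_max_left a j) (ih (max a j))

theorem pv_fmax_ub (g : Nat → Option Nat) :
    ∀ (L : List Nat) (a b j : Nat), b ∈ L → g b = some j → j ≤ pvFMax g L a := by
  intro L
  induction L with
  | nil => intro a b j hb; cases hb
  | cons c r ih =>
    intro a b j hb hg
    rw [pvFMax, List.foldl_cons]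
    rcases List.mem_cons.mp hb with rfl | hbr
    · rw [hg]
      exact le_trans (le_max_right a j) (pv_fmax_ge g r (max a j))
    · cases hgc : g c with
      | none => exact ih a b j hbr hg
      | some j' => exact ih (max a j') b j hbr hg

theorem pv_fmax_cases (g : Nat → Option Nat) :
    ∀ (L : List Nat) (a : Nat), pvFMax g L a = a ∨ ∃ b ∈ L, g b = some (pvFMax g L a) := by
  intro L
  induction L with
  | nil => intro a; left; simp [pvFMax]
  | cons c r ih =>
    intro a
    cases hgc : g c with
    | none =>
      rw [pv_fmax_cons, hgc]
      rcases ih a with h | ⟨b, hb, hgb⟩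
      · left; exact h
      · right; exact ⟨b, List.mem_cons_of_mem c hb, hgb⟩
    | some j =>
      rw [pv_fmax_cons, hgc]
      dsimp only
      rcases ih (max a j) with h | ⟨b, hb, hgb⟩
      · rcases max_choice a j with hm | hm
        · left; rw [h, hm]
        · right
          refine ⟨c, List.mem_cons_self .., ?_⟩
          rw [hgc, h, hm]
      · right; exact ⟨b, List.mem_cons_of_mem c hb, hgb⟩

theorem pv_far_le_iff (l : List Nat) (j : Nat) :
    pvFar l ≤ j ↔ ∀ b, b < 32 → ∀ j', pvOcc l b = some j' → j' ≤ j := by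
  constructor
  · intro h b hb j' hocc
    exact le_trans (pv_fmax_ub (pvOcc l) (List.range 32) 0 b j' (List.mem_range.mpr hb) hocc) h
  · intro h
    rcases pv_fmax_cases (pvOcc l) (List.range 32) 0 with hc | ⟨b, hbmem, hocc⟩
    · rw [pvFar, hc]; omega
    · exact h b (List.mem_range.mp hbmem) _ hocc

theorem pv_far_lt_len (l : List Nat) (hl : l ≠ []) : pvFar l < l.length := by
  rcases pv_fmax_cases (pvOcc l) (List.range 32) 0 with hc | ⟨b, _, hocc⟩
  · rw [pvFar, hc]
    exact List.length_pos_iff.mpr hl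
  · exact pv_occ_lt l b _ hocc

theorem pv_take_or_iff (l : List Nat) (h32 : ∀ x ∈ l, x < 2 ^ 32) (j : Nat) :
    (pvOr (l.take (j + 1)) = pvOr l) ↔ pvFar l ≤ j := by
  constructor
  · intro he
    rw [pv_far_le_iff]
    intro b hb j' hocc
    obtain ⟨x, hx, hxb⟩ := pv_occ_testBit l b j' hocc
    have h1 : (pvOr l).testBit b = true := by
      rw [pv_testBit_pvOr]
      exact List.any_eq_true.mpr ⟨x, hx, hxb⟩
    have h2 : (pvOr (l.take (j + 1))).testBit b = true := by rw [he]; exact h1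
    rw [pv_testBit_pvOr] at h2
    obtain ⟨j0, hj0, hj0lt⟩ := (pv_any_take _ l (j + 1)).mp h2
    rw [pvOcc] at hocc
    rw [hocc] at hj0
    cases hj0
    omega
  · intro hf
    apply Nat.eq_of_testBit_eq
    intro b
    rw [pv_testBit_pvOr, pv_testBit_pvOr]
    cases hany : l.any (fun x => x.testBit b) with
    | false =>
      rw [List.any_eq_false] at hany ⊢
      intro x hx
      exact hany x (List.mem_of_mem_take hx)
    | true =>
      obtain ⟨x, hx, hxb⟩ := List.any_eq_true.mp hany
      have hb32 : b < 32 := by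
        by_contra hge
        push_neg at hge
        have hlt : x < 2 ^ b :=
          lt_of_lt_of_le (h32 x hx) (Nat.pow_le_pow_right (by norm_num) hge)
        rw [Nat.testBit_eq_false_of_lt hlt] at hxb
        cases hxb
      have hsome := pv_occ_isSome_of_mem l b x hx hxb
      obtain ⟨j0, hj0⟩ := Option.isSome_iff_exists.mp hsome
      have hle : j0 ≤ j := (pv_far_le_iff l j).mp hf b hb32 j0 hj0
      rw [pvOcc] at hj0
      exact (pv_any_take _ l (j + 1)).mpr ⟨j0, hj0, by omega⟩

/- ---- the scan ---- -/

theorem pv_scan_spec :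
    ∀ (l : List Nat) (cur k N : Nat), N < l.length →
      (∀ j : Nat, (cur ||| pvOr (l.take (j + 1)) = cur ||| pvOr l) ↔ N ≤ j) →
      pvScan l cur (cur ||| pvOr l) k = k + N + 1 := by
  intro l
  induction l with
  | nil => intro cur k N hN _; simp at hN
  | cons x r ih =>
    intro cur k N hN hj
    have hx1 : pvOr ((x :: r).take 1) = x := by simp [pvOr]
    by_cases hstop : cur ||| x = cur ||| pvOr (x :: r)
    · rw [pvScan, if_pos hstop]
      have hpre : cur ||| pvOr ((x :: r).take (0 + 1)) = cur ||| pvOr (x :: r) := by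
        simp only [Nat.zero_add]
        rw [hx1]
        exact hstop
      have h0 : N ≤ 0 := (hj 0).mp hpre
      omega
    · rw [pvScan, if_neg hstop]
      have h1 : ¬ N ≤ 0 := by
        intro h
        have h2 := (hj 0).mpr h
        simp only [Nat.zero_add] at h2
        rw [hx1] at h2
        exact hstop h2
      cases N with
      | zero => exact absurd (le_refl 0) h1
      | succ N' =>
        have htar : cur ||| pvOr (x :: r) = (cur ||| x) ||| pvOr r := by
          rw [pv_or_cons, Nat.lor_assoc]
        rw [htar]
        have hrec := ih (cur ||| x) (k + 1) N' (by simpa using hN) ?_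
        · rw [hrec]; omega
        · intro j
          have hstep := hj (j + 1)
          rw [List.take_succ_cons, pv_or_cons, ← Nat.lor_assoc, htar] at hstep
          constructor
          · intro h; have := hstep.mp h; omega
          · intro h; exact hstep.mpr (by omega)

theorem pv_scan_far (l : List Nat) (h32 : ∀ x ∈ l, x < 2 ^ 32) (hl : l ≠ []) :
    pvScan l 0 (pvOr l) 0 = pvFar l + 1 := by
  have h := pv_scan_spec l 0 0 (pvFar l) (pv_far_lt_len l hl)
    (by intro j; simpa using pv_take_or_iff l h32 j)
  simpa using h

/- ---- B-side reduction ---- -/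

theorem pv_bScan_eq :
    ∀ (l : List Int) (cur target k : Nat),
      bScan l (↑cur) (↑target) (↑k) = ((pvScan (pvMs l) cur target k : Nat) : Int) := by
  intro l
  induction l with
  | nil => intro cur target k; rfl
  | cons v r ih =>
    intro cur target k
    have hcur : PySem.Int.bor (↑cur) (PySem.Int.band v 4294967295) =
        ((cur ||| pvMask v : Nat) : Int) := by
      rw [pv_band_mask_eq, PySem.Int.bor_natCast]
    simp only [bScan, hcur, pvMs, List.map_cons, pvScan]
    by_cases h : cur ||| pvMask v = target
    · rw [if_pos (by exact_mod_cast h), if_pos h]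
      push_cast
      ring
    · rw [if_neg (by exact_mod_cast fun hh => h (by exact_mod_cast hh)), if_neg h]
      rw [show ((k : Int) + 1) = ((k + 1 : Nat) : Int) by push_cast; ring]
      exact ih (cur ||| pvMask v) target (k + 1)

theorem pv_btarget :
    ∀ (l : List Int) (a : Nat),
      (l.foldl (fun a v => PySem.Int.bor a (PySem.Int.band v 4294967295)) (↑a) : Int) =
        (((pvMs l).foldl (· ||| ·) a : Nat) : Int) := by
  intro l
  induction l with
  | nil => intro a; rfl
  | cons v r ih =>
    intro a
    rw [List.foldl_cons, pv_band_mask_eq, PySem.Int.bor_natCast, pvMs, List.map_cons,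
      List.foldl_cons]
    exact ih (a ||| pvMask v)

theorem pv_foldl_append {β γ : Type} (f : β → γ) :
    ∀ (L : List β) (acc : List γ), L.foldl (fun res i => res ++ [f i]) acc = acc ++ L.map f := by
  intro L
  induction L with
  | nil => intro acc; simp
  | cons x r ih => intro acc; simp [ih]

theorem pv_alt_eq (nums : List Int) : smallestSubarrays_alt nums = pvRes nums 0 := by
  show (PySem.List.pyRange 0 (PySem.List.len nums) 1).foldl
      (fun res i => res ++ [bScan (PySem.List.slice nums (some i) none) 0
        ((PySem.List.slice nums (some i) none).foldl
          (fun a v => PySem.Int.bor a (PySem.Int.band v 4294967295)) 0) 0])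
      [] = pvRes nums 0
  rw [pv_foldl_append (fun i => bScan (PySem.List.slice nums (some i) none) 0
    ((PySem.List.slice nums (some i) none).foldl
      (fun a v => PySem.Int.bor a (PySem.Int.band v 4294967295)) 0) 0)]
  rw [List.nil_append]
  have hrange : PySem.List.pyRange 0 (PySem.List.len nums) 1 =
      (List.range nums.length).map (fun k : Nat => (k : Int)) := by
    rw [PySem.List.len_eq, PySem.List.pyRange_one]
    simp
  rw [hrange, List.map_map]
  rw [pvRes]
  apply List.map_congr_left
  intro k hk
  simp only [Function.comp_apply]
  rw [if_pos (Nat.zero_le k)]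
  rw [PySem.List.slice_from_natCast]
  have h0 : (0 : Int) = ((0 : Nat) : Int) := rfl
  rw [h0, pv_btarget (nums.drop k) 0, pv_bScan_eq (nums.drop k) 0 _ 0, pvAns]
  rfl

/- ---- generic set-fold ---- -/

theorem pv_getD_set {α : Type} (l : List α) (i : Nat) (v : α) (j : Nat) (d : α) :
    (l.set i v).getD j d = if i = j ∧ i < l.length then v else l.getD j d := by
  by_cases hj : j < l.length
  · rw [List.getD_eq_getElem _ _ (by simpa using hj), List.getElem_set,
      List.getD_eq_getElem _ _ hj]
    by_cases hij : i = j
    · subst hij; simp [hj]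
    · simp [hij]
  · have hj' : ¬ j < (l.set i v).length := by simpa using hj
    rw [List.getD_eq_default _ _ (by omega), List.getD_eq_default _ _ (by omega)]
    have : ¬ (i = j ∧ i < l.length) := by rintro ⟨rfl, h⟩; exact hj h
    rw [if_neg this]

theorem pv_fold_set {α : Type} (v' : α) (d : α) (c : Nat → Prop) [DecidablePred c] :
    ∀ (L : List Nat) (lo : List α),
      ((L.foldl (fun l b => if c b then l.set b v' else l) lo).length = lo.length) ∧
      (∀ j, (L.foldl (fun l b => if c b then l.set b v' else l) lo).getD j d =
        if j ∈ L ∧ c j ∧ j < lo.length then v' else lo.getD j d) := by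
  intro L
  induction L with
  | nil => intro lo; simp
  | cons b r ih =>
    intro lo
    rw [List.foldl_cons]
    by_cases hcb : c b
    · rw [if_pos hcb]
      obtain ⟨ihlen, ihget⟩ := ih (lo.set b v')
      constructor
      · rw [ihlen]; simp
      · intro j
        rw [ihget j, pv_getD_set]
        by_cases hjr : j ∈ r ∧ c j ∧ j < (lo.set b v').length
        · rw [if_pos hjr]
          have : j ∈ b :: r ∧ c j ∧ j < lo.length := by
            refine ⟨List.mem_cons_of_mem b hjr.1, hjr.2.1, by simpa using hjr.2.2⟩
          rw [if_pos this]
        · rw [if_neg hjr]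
          by_cases hbj : b = j ∧ b < lo.length
          · obtain ⟨rfl, hblen⟩ := hbj
            rw [if_pos ⟨rfl, hblen⟩, if_pos ⟨List.mem_cons_self .., hcb, hblen⟩]
          · rw [if_neg hbj]
            by_cases hfull : j ∈ b :: r ∧ c j ∧ j < lo.length
            · exfalso
              obtain ⟨hmem, hcj, hjlen⟩ := hfull
              rcases List.mem_cons.mp hmem with rfl | hmr
              · exact hbj ⟨rfl, hjlen⟩
              · exact hjr ⟨hmr, hcj, by simpa using hjlen⟩
            · rw [if_neg hfull]
    · rw [if_neg hcb]
      obtain ⟨ihlen, ihget⟩ := ih lo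
      refine ⟨ihlen, ?_⟩
      intro j
      rw [ihget j]
      by_cases hjr : j ∈ r ∧ c j ∧ j < lo.length
      · rw [if_pos hjr, if_pos ⟨List.mem_cons_of_mem b hjr.1, hjr.2⟩]
      · rw [if_neg hjr]
        by_cases hfull : j ∈ b :: r ∧ c j ∧ j < lo.length
        · exfalso
          obtain ⟨hmem, hcj, hjlen⟩ := hfull
          rcases List.mem_cons.mp hmem with rfl | hmr
          · exact hcb hcj
          · exact hjr ⟨hmr, hcj, hjlen⟩
        · rw [if_neg hfull]

/- ---- pairing the farthest fold with pvFMax ---- -/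

theorem pv_far_pair (t : Nat) (g : Nat → Option Nat) (C : Nat → Prop) [DecidablePred C]
    (eg : Nat → Int) :
    ∀ (L : List Nat),
      (∀ b ∈ L, ((g b).isSome = true → C b) ∧ eg b = pvEnc ((g b).map (· + t))) →
      ∀ (fN : Nat),
        L.foldl (fun f b => if C b then (if eg b ≠ -1 then max f (eg b) else f) else f)
            ((t : Int) + (fN : Int)) =
          (t : Int) + ((pvFMax g L fN : Nat) : Int) := by
  intro L
  induction L with
  | nil => intro _ fN; simp [pvFMax]
  | cons b r ih =>
    intro hyp fN
    have hb := hyp b (List.mem_cons_self ..)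
    rw [List.foldl_cons, pv_fmax_cons]
    cases hg : g b with
    | none =>
      dsimp only
      have hegb : eg b = -1 := by rw [hb.2, hg]; rfl
      rw [hegb, if_neg (show ¬ ((-1 : Int) ≠ -1) by simp), ite_self]
      exact ih (fun b' hb' => hyp b' (List.mem_cons_of_mem b hb')) fN
    | some j =>
      dsimp only
      have hC : C b := hb.1 (by rw [hg]; rfl)
      have hegb : eg b = ((j + t : Nat) : Int) := by rw [hb.2, hg]; rfl
      rw [if_pos hC, hegb, if_pos (show ((j + t : Nat) : Int) ≠ -1 by push_cast; omega)]
      have hmax : max ((t : Int) + (fN : Int)) ((j + t : Nat) : Int) =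
          (t : Int) + ((max fN j : Nat) : Int) := by
        rcases le_total fN j with h | h
        · rw [Nat.max_eq_right h,
            max_eq_right (show (t : Int) + (fN : Int) ≤ ((j + t : Nat) : Int) by push_cast; omega)]
          push_cast
          ring
        · rw [Nat.max_eq_left h,
            max_eq_left (show ((j + t : Nat) : Int) ≤ (t : Int) + (fN : Int) by push_cast; omega)]
      rw [hmax]
      exact ih (fun b' hb' => hyp b' (List.mem_cons_of_mem b hb')) (max fN j)

/- ---- the A loop step ---- -/

theorem pv_range32 : PySem.List.pyRange 0 32 1 = (List.range 32).map (fun k : Nat => (k : Int)) := by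
  rw [PySem.List.pyRange_one]
  simp

theorem pv_drop_ms (nums : List Int) (t : Nat) :
    pvMs (nums.drop t) = (pvMs nums).drop t := by
  simp [pvMs]

theorem pv_ms_elt_lt (nums : List Int) (x : Nat) (hx : x ∈ pvMs nums) : x < 2 ^ 32 := by
  rw [pvMs, List.mem_map] at hx
  obtain ⟨v, _, rfl⟩ := hx
  exact pv_mask_lt v

theorem pv_step (nums : List Int) (t : Nat) (ht : t < nums.length) (lo res : List Int)
    (hlen : lo.length = 32)
    (hlo : ∀ b, b < 32 →
      lo.getD b 0 = pvEnc ((pvOcc ((pvMs nums).drop (t + 1)) b).map (· + (t + 1)))) :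
    (pvStepA nums (nums.foldl (fun a num => PySem.Int.bor a num) 0) (lo, res) (↑t)).1.length = 32 ∧
    (∀ b, b < 32 →
      (pvStepA nums (nums.foldl (fun a num => PySem.Int.bor a num) 0) (lo, res) (↑t)).1.getD b 0 =
        pvEnc ((pvOcc ((pvMs nums).drop t) b).map (· + t))) ∧
    (pvStepA nums (nums.foldl (fun a num => PySem.Int.bor a num) 0) (lo, res) (↑t)).2 =
      PySem.List.pySetD res (↑t) (pvAns (nums.drop t)) := by
  have htm : t < (pvMs nums).length := by simpa [pvMs] using ht
  have hnum : PySem.List.pyGetD nums (↑t : Int) 0 = nums[t] := by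
    rw [PySem.List.pyGetD_natCast, List.getD_eq_getElem _ _ ht]
  have hdrop : (pvMs nums).drop t = pvMask nums[t] :: (pvMs nums).drop (t + 1) := by
    rw [List.drop_eq_getElem_cons htm]
    congr 1
    simp [pvMs]
  have hfold := pv_fold_set ((t : Nat) : Int) (0 : Int)
    (fun b : Nat => PySem.Int.band nums[t] ((1 : Int) <<< (b : Int)) ≠ 0)
    (List.range 32) lo
  simp only [pvStepA, hnum, pv_range32, List.foldl_map, Int.toNat_natCast,
    PySem.List.pySetD_natCast, PySem.List.pyGetD_natCast]
  set lo' := (List.range 32).foldl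
    (fun (l : List Int) (b : Nat) =>
      if PySem.Int.band nums[t] ((1 : Int) <<< (b : Int)) ≠ 0 then l.set b ((t : Nat) : Int) else l)
    lo with hlo'def
  have hlen' : lo'.length = 32 := by rw [hfold.1, hlen]
  have hget' : ∀ b, b < 32 →
      lo'.getD b 0 = pvEnc ((pvOcc ((pvMs nums).drop t) b).map (· + t)) := by
    intro b hb
    rw [hfold.2 b, hdrop, pv_occ_cons]
    by_cases hbit : (pvMask nums[t]).testBit b = true
    · have hc : PySem.Int.band nums[t] ((1 : Int) <<< (b : Int)) ≠ 0 := by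
        rw [pv_band_pow_ne]
        have h1 := pv_testBit_mask nums[t] b
        rw [hbit] at h1
        simp [hb] at h1
        first
        | exact h1
        | exact h1.symm
      rw [if_pos ⟨List.mem_range.mpr hb, hc, by rw [hlen]; exact hb⟩, if_pos hbit]
      simp [pvEnc]
    · have hbit' : (pvMask nums[t]).testBit b = false := by
        cases h : (pvMask nums[t]).testBit b
        · rfl
        · exact absurd h hbit
      have hc : ¬ (PySem.Int.band nums[t] ((1 : Int) <<< (b : Int)) ≠ 0) := by
        rw [pv_band_pow_ne]
        intro h
        have h1 := pv_testBit_mask nums[t] b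
        rw [hbit', h] at h1
        simp [hb] at h1
      rw [if_neg (by rintro ⟨_, hcj, _⟩; exact hc hcj),
        if_neg (by rw [hbit']; exact Bool.false_ne_true)]
      rw [hlo b hb]
      cases hocc : pvOcc ((pvMs nums).drop (t + 1)) b with
      | none => rfl
      | some j =>
        simp only [Option.map_some, pvEnc]
        congr 1
        omega
  refine ⟨hlen', hget', ?_⟩
  refine congrArg (fun z => res.set t z) ?_
  have hpair := pv_far_pair t (pvOcc ((pvMs nums).drop t))
    (fun b : Nat => PySem.Int.band (nums.foldl (fun a num => PySem.Int.bor a num) 0)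
      ((1 : Int) <<< (b : Int)) ≠ 0)
    (fun b : Nat => lo'.getD b 0)
    (List.range 32)
    (by
      intro b hbmem
      have hb : b < 32 := List.mem_range.mp hbmem
      constructor
      · intro hsome
        obtain ⟨j, hj⟩ := Option.isSome_iff_exists.mp hsome
        obtain ⟨x, hxmem, hxbit⟩ := pv_occ_testBit _ b j hj
        rw [pv_band_pow_ne, pv_testBit_maxOr nums b hb, pv_testBit_pvOr]
        exact List.any_eq_true.mpr ⟨x, List.mem_of_mem_drop hxmem, hxbit⟩
      · exact hget' b hb)
    0
  simp only [Nat.cast_zero, add_zero] at hpair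
  rw [hpair]
  have hms32 : ∀ x ∈ (pvMs nums).drop t, x < 2 ^ 32 :=
    fun x hx => pv_ms_elt_lt nums x (List.mem_of_mem_drop hx)
  have hmsne : (pvMs nums).drop t ≠ [] := by
    rw [hdrop]; exact List.cons_ne_nil _ _
  have hfar : pvAns (nums.drop t) = ((pvFar ((pvMs nums).drop t) + 1 : Nat) : Int) := by
    rw [pvAns, pv_drop_ms, pv_scan_far ((pvMs nums).drop t) hms32 hmsne]
  rw [hfar, pvFar]
  push_cast
  ring

/- ---- the A loop ---- -/

theorem pv_res_set (nums : List Int) (t : Nat) (ht : t < nums.length) :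
    PySem.List.pySetD (pvRes nums (t + 1)) (↑t) (pvAns (nums.drop t)) = pvRes nums t := by
  rw [PySem.List.pySetD_natCast]
  apply List.ext_getElem
  · simp [pvRes]
  · intro j hj1 hj2
    have hjlen : j < nums.length := by simpa [pvRes] using hj2
    rw [List.getElem_set]
    by_cases hjt : t = j
    · subst hjt
      rw [if_pos rfl]
      simp [pvRes, hjlen]
    · rw [if_neg hjt]
      simp only [pvRes, List.getElem_map, List.getElem_range]
      by_cases hle : t ≤ j
      · rw [if_pos (by omega), if_pos hle]
      · rw [if_neg (by omega), if_neg hle]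

theorem pv_loop (nums : List Int) :
    ∀ (t : Nat), t ≤ nums.length → ∀ (lo res : List Int), lo.length = 32 →
      (∀ b, b < 32 →
        lo.getD b 0 = pvEnc ((pvOcc ((pvMs nums).drop t) b).map (· + t))) →
      res = pvRes nums t →
      ((PySem.List.pyRange ((t : Int) - 1) (-1) (-1)).foldl
        (pvStepA nums (nums.foldl (fun a num => PySem.Int.bor a num) 0)) (lo, res)).2 =
        pvRes nums 0 := by
  intro t
  induction t with
  | zero =>
    intro _ lo res _ _ hres
    rw [show ((0 : Nat) : Int) - 1 = -1 by norm_num,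
      PySem.List.pyRange_neg_one_eq_nil (by norm_num), List.foldl_nil]
    exact hres
  | succ t ih =>
    intro ht lo res hlen hlo hres
    rw [show ((t + 1 : Nat) : Int) - 1 = ((t : Nat) : Int) by push_cast; ring,
      PySem.List.pyRange_neg_one_cons (by omega), List.foldl_cons]
    obtain ⟨hlen', hlo', hres'⟩ := pv_step nums t (by omega) lo res hlen hlo
    have hpair : pvStepA nums (nums.foldl (fun a num => PySem.Int.bor a num) 0) (lo, res) (↑t) =
        ((pvStepA nums (nums.foldl (fun a num => PySem.Int.bor a num) 0) (lo, res) (↑t)).1,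
         (pvStepA nums (nums.foldl (fun a num => PySem.Int.bor a num) 0) (lo, res) (↑t)).2) := rfl
    rw [hpair, hres', hres, pv_res_set nums t (by omega)]
    exact ih (by omega) _ _ hlen' hlo' rfl

theorem pv_A_eq (nums : List Int) : smallestSubarrays nums = pvRes nums 0 := by
  show ((PySem.List.pyRange ((PySem.List.len nums) - 1) (-1) (-1)).foldl
      (pvStepA nums (nums.foldl (fun a num => PySem.Int.bor a num) 0))
      (List.replicate 32 (-1), List.replicate (PySem.List.len nums).toNat 1)).2 = pvRes nums 0
  rw [PySem.List.len_eq, Int.toNat_natCast]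
  apply pv_loop nums nums.length le_rfl
  · simp
  · intro b hb
    have hocc : pvOcc ((pvMs nums).drop nums.length) b = none := by
      rw [List.drop_of_length_le (by simp [pvMs])]
      simp [pvOcc]
    rw [hocc]
    show (List.replicate 32 (-1 : Int)).getD b 0 = pvEnc none
    rw [List.getD_eq_getElem _ _ (by simpa using hb), List.getElem_replicate]
    rfl
  · apply List.ext_getElem
    · simp [pvRes]
    · intro j hj1 hj2
      have hjlen : j < nums.length := by simpa using hj1
      simp only [pvRes, List.getElem_replicate, List.getElem_map, List.getElem_range]
      rw [if_neg (by omega)]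

-- ===== VERDICT (by name: the statement is the Claim_ definition above) =====
theorem smallestSubarrays_spec : Claim_equal_smallestSubarrays := by
  intro nums _
  unfold Spec_smallestSubarrays
  rw [pv_A_eq, pv_alt_eq]
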